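-- pv_equiv track=rewrite | github.com/ChenShizhe/paper-reader | paper-reader/scripts/segmenters/latex_segmenter.py | _is_safe_position
-- ===== SOURCE A (Python) =====
-- _COHESION_ENVS = ['equation', 'proof', 'align', 'align*', 'lemma', 'theorem',
--                   'proposition', 'corollary', 'remark']
--
-- def _is_safe_position(text: str, pos: int) -> bool:
--     """Return True if pos is outside all cohesion LaTeX environments."""
--     prefix = text[:pos]
--     for env in _COHESION_ENVS:
--         opens = prefix.count(f'\\begin{{{env}}}')
--         closes = prefix.count(f'\\end{{{env}}}')
--         if opens > closes:
--             return False
--     return True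
-- ===== SOURCE B (Python) =====
-- _COHESION_ENVS = ['equation', 'proof', 'align', 'align*', 'lemma', 'theorem',
--                   'proposition', 'corollary', 'remark']
--
--
-- def _is_safe_position(text: str, pos: int) -> bool:
--     """Return True if pos is outside all cohesion LaTeX environments.
--
--     Single left-to-right scan of the prefix: every \begin{name} / \end{name}
--     occurrence updates a signed depth table, instead of A's re-scanning of
--     the prefix once per environment name."""
--     prefix = text[:pos]
--     depth = {}
--     i = 0
--     n = len(prefix)
--     while i < n:
--         if prefix.startswith('\\begin{', i):
--             j = prefix.find('}', i + 7)
--             if j != -1: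
--                 name = prefix[i + 7:j]
--                 if name in _COHESION_ENVS:
--                     depth[name] = depth.get(name, 0) + 1
--         elif prefix.startswith('\\end{', i):
--             j = prefix.find('}', i + 5)
--             if j != -1:
--                 name = prefix[i + 5:j]
--                 if name in _COHESION_ENVS:
--                     depth[name] = depth.get(name, 0) - 1
--         i += 1
--     return all(depth.get(e, 0) <= 0 for e in _COHESION_ENVS)
-- ===== Notes on version B (the rewrite author's own statement) =====
-- stated objective: alternative
-- what changed: B makes a single left-to-right scan of the prefix, parsing each \begin{...}/\end{...} occurrence once into a signed depth dict keyed by cohesion environment, instead of A's 18 separate substring-count passes (two per environment name); in CPython the C-level str.count makes A's passes faster in wall-clock despite the extra traversals.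
import Mathlib
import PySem

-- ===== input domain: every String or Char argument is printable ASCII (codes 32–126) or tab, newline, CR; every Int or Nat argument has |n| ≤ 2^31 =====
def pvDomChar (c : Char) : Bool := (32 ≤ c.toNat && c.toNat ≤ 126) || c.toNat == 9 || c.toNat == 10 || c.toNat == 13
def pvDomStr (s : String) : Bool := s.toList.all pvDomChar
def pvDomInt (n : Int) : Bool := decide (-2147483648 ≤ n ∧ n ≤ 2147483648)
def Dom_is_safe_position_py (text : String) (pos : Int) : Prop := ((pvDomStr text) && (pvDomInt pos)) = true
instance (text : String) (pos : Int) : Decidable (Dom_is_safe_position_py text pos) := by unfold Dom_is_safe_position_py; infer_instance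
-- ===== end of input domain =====

-- B replaces A's 18 substring-count passes over the prefix by ONE left-to-right scan
-- maintaining a signed depth dict per cohesion environment (objective: alternative algorithm).

-- shared module constant _COHESION_ENVS (used by both Pythons), as code-point lists
def pvCohesionEnvs : List (List Char) :=
  ["equation".toList, "proof".toList, "align".toList, "align*".toList, "lemma".toList,
   "theorem".toList, "proposition".toList, "corollary".toList, "remark".toList]

-- ===== PORT A =====
-- the for-loop over _COHESION_ENVS with its early 'return False';
-- f'\\begin{{{env}}}' / f'\\end{{{env}}}' are the concatenations below, prefix.count is PySem.Chars.count
def pvLoopA (pre : List Char) : List (List Char) → Bool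
  | [] => true
  | env :: rest =>
      let opens := PySem.Chars.count pre ("\\begin{".toList ++ env ++ ['}'])
      let closes := PySem.Chars.count pre ("\\end{".toList ++ env ++ ['}'])
      if opens > closes then false else pvLoopA pre rest

def is_safe_position_py (text : String) (pos : Int) : Bool :=
  -- prefix = text[:pos]
  pvLoopA (PySem.Chars.slice text.toList none (some pos)) pvCohesionEnvs

-- ===== PORT B =====
-- the 'while i < n' scan, as structural recursion on the remaining suffix prefix[i:];
-- prefix.startswith(kw, i) is kw.isPrefixOf on the suffix; "j = prefix.find('}', i+k); j != -1"
-- with "name = prefix[i+k:j]" is exactly: '}' occurs in rest = suffix[k:], name = rest.takeWhile (· ≠ '}')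
def pvStep (l : List Char) (d : PySem.Dict (List Char) Int) : PySem.Dict (List Char) Int :=
  if "\\begin{".toList.isPrefixOf l then
    let rest := l.drop 7
    if '}' ∈ rest then
      let name := rest.takeWhile (· ≠ '}')
      if pvCohesionEnvs.contains name then d.modify name 0 (· + 1) else d
    else d
  else if "\\end{".toList.isPrefixOf l then
    let rest := l.drop 5
    if '}' ∈ rest then
      let name := rest.takeWhile (· ≠ '}')
      if pvCohesionEnvs.contains name then d.modify name 0 (· - 1) else d
    else d
  else d

def pvScan : List Char → PySem.Dict (List Char) Int → PySem.Dict (List Char) Int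
  | [], d => d
  | c :: t, d => pvScan t (pvStep (c :: t) d)

def is_safe_position_py_alt (text : String) (pos : Int) : Bool :=
  let d := pvScan (PySem.Chars.slice text.toList none (some pos)) PySem.Dict.empty
  pvCohesionEnvs.all (fun e => decide (d.getD e 0 ≤ 0))

-- ===== PRECONDITION & SPEC =====
def Spec_is_safe_position_py (text : String) (pos : Int) (out : Bool) : Prop := out = is_safe_position_py_alt text pos
instance (text : String) (pos : Int) (out : Bool) : Decidable (Spec_is_safe_position_py text pos out) := by unfold Spec_is_safe_position_py; infer_instance

-- ===== CLAIM (what is proved, stated in full; the proofs are below) =====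
def Claim_equal_is_safe_position_py : Prop := ∀ (text : String) (pos : Int), Dom_is_safe_position_py text pos → Spec_is_safe_position_py text pos (is_safe_position_py text pos)

-- ===== LEMMAS AND PROOFS =====

-- number of positions of l at which sub starts
def pvOcc (sub : List Char) : List Char → Nat
  | [] => 0
  | c :: t => (if sub.isPrefixOf (c :: t) then 1 else 0) + pvOcc sub t

def pvBeg (env : List Char) : List Char := "\\begin{".toList ++ env ++ ['}']
def pvEnd (env : List Char) : List Char := "\\end{".toList ++ env ++ ['}']

-- no occurrence of h::tl can start inside a block that avoids h
theorem pvOcc_skip (h : Char) (tl m r : List Char) (hm : h ∉ m) :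
    pvOcc (h :: tl) (m ++ r) = pvOcc (h :: tl) r := by
  induction m with
  | nil => rfl
  | cons c m' ih =>
    simp only [List.mem_cons, not_or] at hm
    have hnot : (h :: tl).isPrefixOf (c :: (m' ++ r)) = false := by
      simp only [List.isPrefixOf, Bool.and_eq_false_iff, beq_eq_false_iff_ne]
      exact Or.inl hm.1
    simp [pvOcc, hnot, ih hm.2]

-- a self-non-overlapping pattern: match at the head ⇒ next match is past the whole pattern
theorem pvOcc_of_prefix (h : Char) (tl l : List Char) (hp : (h :: tl).isPrefixOf l)
    (hh : h ∉ tl) : pvOcc (h :: tl) l = 1 + pvOcc (h :: tl) (l.drop (tl.length + 1)) := by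
  rw [List.isPrefixOf_iff_prefix] at hp
  obtain ⟨r, rfl⟩ := hp
  have h1 : pvOcc (h :: tl) (h :: tl ++ r) = 1 + pvOcc (h :: tl) (tl ++ r) := by
    simp [pvOcc, List.isPrefixOf_iff_prefix]
  rw [h1, pvOcc_skip h tl tl r hh]
  congr 1
  have : List.drop (tl.length + 1) (h :: tl ++ r) = List.drop tl.length (tl ++ r) := rfl
  rw [this, List.drop_left]

theorem pvCountGo_eq (h : Char) (tl : List Char) (hh : h ∉ tl) :
    ∀ (fuel : Nat) (l : List Char) (acc : Nat), l.length ≤ fuel →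
      PySem.Chars.count.go (h :: tl) fuel l acc = acc + pvOcc (h :: tl) l := by
  intro fuel
  induction fuel with
  | zero =>
    intro l acc hl
    have hnil : l = [] := List.eq_nil_of_length_eq_zero (Nat.le_zero.mp hl)
    subst hnil
    rw [PySem.Chars.count.go.eq_def]
    simp [pvOcc]
  | succ n ih =>
    intro l acc hl
    cases l with
    | nil => rw [PySem.Chars.count.go.eq_def]; simp [pvOcc]
    | cons c t =>
      rw [PySem.Chars.count.go.eq_def]
      simp only []
      by_cases hp : (h :: tl).isPrefixOf (c :: t)
      · rw [if_pos hp]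
        have hlen : (List.drop (h :: tl).length (c :: t)).length ≤ n := by
          simp only [List.length_drop, List.length_cons] at *
          omega
        rw [ih _ _ hlen, pvOcc_of_prefix h tl (c :: t) hp hh]
        simp only [List.length_cons]
        omega
      · rw [if_neg hp, ih t acc (by simpa using Nat.lt_succ_iff.mp (Nat.lt_of_lt_of_le (Nat.lt_succ_of_le le_rfl) hl))]
        simp [pvOcc, hp]

-- Python's non-overlapping str.count equals positional count for such patterns
theorem pvCount_eq (h : Char) (tl l : List Char) (hh : h ∉ tl) :
    PySem.Chars.count l (h :: tl) = pvOcc (h :: tl) l := by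
  simp [PySem.Chars.count, pvCountGo_eq h tl hh l.length l 0 le_rfl]

-- parsing: with '}' present in r and absent from name, "name}" is a prefix of r
-- exactly when the scan's takeWhile returns name
theorem pvParse_iff (name r : List Char) (hn : '}' ∉ name) (hr : '}' ∈ r) :
    (name ++ ['}']) <+: r ↔ r.takeWhile (· ≠ '}') = name := by
  constructor
  · rintro ⟨r', rfl⟩
    have ht : List.takeWhile (fun x => decide (x ≠ '}')) name = name := by
      rw [List.takeWhile_eq_self_iff]
      intro c hc
      simp only [decide_eq_true_eq]
      exact fun he => hn (he ▸ hc)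
    rw [List.append_assoc, List.singleton_append, List.takeWhile_append, if_pos (by rw [ht])]
    simp
  · intro htw
    have hsplit := (List.takeWhile_append_dropWhile (p := fun c => decide (c ≠ '}')) (l := r)).symm
    rcases hdl : r.dropWhile (fun c => decide (c ≠ '}')) with _ | ⟨a, tl2⟩
    · exfalso
      rw [hsplit, hdl, List.append_nil] at hr
      have := List.mem_takeWhile_imp hr
      simp at this
    · have hne : r.dropWhile (fun c => decide (c ≠ '}')) ≠ [] := by rw [hdl]; exact List.cons_ne_nil a tl2
      have ha : a = '}' := by
        have h2 := List.head_dropWhile_not (fun c => decide (c ≠ '}')) hne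
        simp only [hdl, List.head_cons, decide_eq_false_iff_not, not_not] at h2
        exact h2
      refine ⟨tl2, ?_⟩
      conv_rhs => rw [hsplit, hdl, htw, ha]
      simp

-- one step of the scan changes name's entry by (starts-with \begin{name}) - (starts-with \end{name})
theorem pvStep_getD (name : List Char) (hmem : name ∈ pvCohesionEnvs) (hn : '}' ∉ name)
    (l : List Char) (d : PySem.Dict (List Char) Int) :
    (pvStep l d).getD name 0 =
      d.getD name 0 + (if (pvBeg name).isPrefixOf l then (1 : Int) else 0)
        - (if (pvEnd name).isPrefixOf l then (1 : Int) else 0) := by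
  unfold pvStep
  by_cases hB : "\\begin{".toList.isPrefixOf l = true
  · rw [if_pos hB]
    obtain ⟨r, rfl⟩ := List.isPrefixOf_iff_prefix.mp hB
    have hdrop : ("\\begin{".toList ++ r).drop 7 = r := by
      have h := List.drop_left (l₁ := "\\begin{".toList) (l₂ := r)
      rwa [show ("\\begin{".toList).length = 7 from by decide] at h
    have hE0 : ¬ ((pvEnd name).isPrefixOf ("\\begin{".toList ++ r) = true) := by
      have : (pvEnd name).isPrefixOf ("\\begin{".toList ++ r) = false := by
        simp [pvEnd, List.isPrefixOf]
      rw [this]; exact Bool.false_ne_true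
    have hBiff : (pvBeg name).isPrefixOf ("\\begin{".toList ++ r) = true ↔ (name ++ ['}']) <+: r := by
      rw [List.isPrefixOf_iff_prefix, pvBeg, List.append_assoc, List.prefix_append_right_inj]
    rw [hdrop]
    by_cases hrc : '}' ∈ r
    · rw [if_pos hrc]
      by_cases hnm : r.takeWhile (· ≠ '}') = name
      · have hcon : pvCohesionEnvs.contains (r.takeWhile (· ≠ '}')) = true := by
          rw [hnm]; exact List.contains_iff_mem.mpr hmem
        have hBp : (pvBeg name).isPrefixOf ("\\begin{".toList ++ r) = true :=
          hBiff.mpr ((pvParse_iff name r hn hrc).mpr hnm)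
        rw [if_pos hcon, hnm, PySem.Dict.getD_modify_self, if_pos hBp, if_neg hE0]
        simp
      · have hBp : ¬ ((pvBeg name).isPrefixOf ("\\begin{".toList ++ r) = true) := by
          intro hc
          exact hnm ((pvParse_iff name r hn hrc).mp (hBiff.mp hc))
        by_cases hcon : pvCohesionEnvs.contains (r.takeWhile (· ≠ '}')) = true
        · rw [if_pos hcon, PySem.Dict.getD_modify, if_neg (Ne.symm hnm), if_neg hBp, if_neg hE0]
          simp
        · rw [if_neg hcon, if_neg hBp, if_neg hE0]
          simp
    · rw [if_neg hrc]
      have hBp : ¬ ((pvBeg name).isPrefixOf ("\\begin{".toList ++ r) = true) := by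
        intro hc
        exact hrc ((hBiff.mp hc).mem (by simp))
      rw [if_neg hBp, if_neg hE0]
      simp
  · rw [if_neg hB]
    have hBp : ¬ ((pvBeg name).isPrefixOf l = true) := by
      intro hc
      exact hB (List.isPrefixOf_iff_prefix.mpr
        (List.IsPrefix.trans ⟨name ++ ['}'], rfl⟩ (List.isPrefixOf_iff_prefix.mp hc)))
    by_cases hEB : "\\end{".toList.isPrefixOf l = true
    · rw [if_pos hEB]
      obtain ⟨r, rfl⟩ := List.isPrefixOf_iff_prefix.mp hEB
      have hdrop : ("\\end{".toList ++ r).drop 5 = r := by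
        have h := List.drop_left (l₁ := "\\end{".toList) (l₂ := r)
        rwa [show ("\\end{".toList).length = 5 from by decide] at h
      have hEiff : (pvEnd name).isPrefixOf ("\\end{".toList ++ r) = true ↔ (name ++ ['}']) <+: r := by
        rw [List.isPrefixOf_iff_prefix, pvEnd, List.append_assoc, List.prefix_append_right_inj]
      rw [hdrop]
      by_cases hrc : '}' ∈ r
      · rw [if_pos hrc]
        by_cases hnm : r.takeWhile (· ≠ '}') = name
        · have hcon : pvCohesionEnvs.contains (r.takeWhile (· ≠ '}')) = true := by
            rw [hnm]; exact List.contains_iff_mem.mpr hmem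
          have hEp : (pvEnd name).isPrefixOf ("\\end{".toList ++ r) = true :=
            hEiff.mpr ((pvParse_iff name r hn hrc).mpr hnm)
          rw [if_pos hcon, hnm, PySem.Dict.getD_modify_self, if_neg hBp, if_pos hEp]
          simp
        · have hEp : ¬ ((pvEnd name).isPrefixOf ("\\end{".toList ++ r) = true) := by
            intro hc
            exact hnm ((pvParse_iff name r hn hrc).mp (hEiff.mp hc))
          by_cases hcon : pvCohesionEnvs.contains (r.takeWhile (· ≠ '}')) = true
          · rw [if_pos hcon, PySem.Dict.getD_modify, if_neg (Ne.symm hnm), if_neg hBp, if_neg hEp]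
            simp
          · rw [if_neg hcon, if_neg hBp, if_neg hEp]
            simp
      · rw [if_neg hrc]
        have hEp : ¬ ((pvEnd name).isPrefixOf ("\\end{".toList ++ r) = true) := by
          intro hc
          exact hrc ((hEiff.mp hc).mem (by simp))
        rw [if_neg hBp, if_neg hEp]
        simp
    · rw [if_neg hEB]
      have hEp : ¬ ((pvEnd name).isPrefixOf l = true) := by
        intro hc
        exact hEB (List.isPrefixOf_iff_prefix.mpr
          (List.IsPrefix.trans ⟨name ++ ['}'], rfl⟩ (List.isPrefixOf_iff_prefix.mp hc)))
      rw [if_neg hBp, if_neg hEp]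
      simp

-- the single scan accumulates, for each cohesion name, opens - closes
theorem pvScan_getD (name : List Char) (hmem : name ∈ pvCohesionEnvs) (hn : '}' ∉ name) :
    ∀ (l : List Char) (d : PySem.Dict (List Char) Int),
      (pvScan l d).getD name 0 =
        d.getD name 0 + (pvOcc (pvBeg name) l : Int) - (pvOcc (pvEnd name) l : Int) := by
  intro l
  induction l with
  | nil => intro d; simp [pvScan, pvOcc]
  | cons c t ih =>
    intro d
    have hstep := pvStep_getD name hmem hn (c :: t) d
    simp only [pvScan, pvOcc, ih, hstep]
    push_cast
    ring

theorem pvMain (pre : List Char) :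
    ∀ (envs : List (List Char)), (∀ e ∈ envs, e ∈ pvCohesionEnvs ∧ '}' ∉ e ∧ '\\' ∉ e) →
      pvLoopA pre envs =
        envs.all (fun e => decide ((pvScan pre PySem.Dict.empty).getD e 0 ≤ 0)) := by
  intro envs
  induction envs with
  | nil => intro _; rfl
  | cons env rest ih =>
    intro h
    obtain ⟨hmem, hnr, hs⟩ := h env List.mem_cons_self
    have ih' := ih (fun e he => h e (List.mem_cons_of_mem _ he))
    have hlit7 : "\\begin{".toList = '\\' :: "begin{".toList := by decide
    have hlit5 : "\\end{".toList = '\\' :: "end{".toList := by decide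
    have hnb : '\\' ∉ ("begin{".toList ++ env ++ ['}']) := by
      intro hmm
      rcases List.mem_append.mp hmm with h1 | h1
      · rcases List.mem_append.mp h1 with h2 | h2
        · revert h2; decide
        · exact hs h2
      · revert h1; decide
    have hne : '\\' ∉ ("end{".toList ++ env ++ ['}']) := by
      intro hmm
      rcases List.mem_append.mp hmm with h1 | h1
      · rcases List.mem_append.mp h1 with h2 | h2
        · revert h2; decide
        · exact hs h2
      · revert h1; decide
    have hopens : PySem.Chars.count pre ("\\begin{".toList ++ env ++ ['}']) = pvOcc (pvBeg env) pre := by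
      rw [pvBeg, hlit7, List.cons_append, List.cons_append]
      exact pvCount_eq '\\' _ pre hnb
    have hcloses : PySem.Chars.count pre ("\\end{".toList ++ env ++ ['}']) = pvOcc (pvEnd env) pre := by
      rw [pvEnd, hlit5, List.cons_append, List.cons_append]
      exact pvCount_eq '\\' _ pre hne
    have hscan := pvScan_getD env hmem hnr pre PySem.Dict.empty
    rw [PySem.Dict.getD_empty] at hscan
    simp only [pvLoopA, List.all_cons]
    by_cases hgt : PySem.Chars.count pre ("\\begin{".toList ++ env ++ ['}']) >
        PySem.Chars.count pre ("\\end{".toList ++ env ++ ['}'])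
    · rw [if_pos hgt]
      have hle : ¬ ((pvScan pre PySem.Dict.empty).getD env 0 ≤ 0) := by
        rw [hscan]
        rw [hopens, hcloses] at hgt
        omega
      simp [hle]
    · rw [if_neg hgt, ih']
      have hle : (pvScan pre PySem.Dict.empty).getD env 0 ≤ 0 := by
        rw [hscan]
        rw [hopens, hcloses] at hgt
        omega
      simp [hle]

-- ===== VERDICT (by name: the statement is the Claim_ definition above) =====
theorem is_safe_position_py_spec : Claim_equal_is_safe_position_py := by
  intro text pos _
  unfold Spec_is_safe_position_py is_safe_position_py is_safe_position_py_alt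
  exact pvMain _ pvCohesionEnvs (by decide)
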